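-- pv_equiv track=rewrite | github.com/repvi/Uartium | uartium/serial_backend.py | _extract_timestamp_field
-- ===== SOURCE A (Python) =====
-- def _extract_timestamp_field(text: str):
--     """
--     Scan tokens in *text* for a  :t=<number>  field.
--     Returns (device_timestamp_uint32, remaining_text) if found,
--     or (None, original_text) otherwise.
--     """
--     tokens = text.split()
--     remaining = []
--     device_ts = None
--     for token in tokens:
--         if "=" in token:
--             name_part, _, raw_value = token.partition("=")
--             if ":" in name_part:
--                 _, _, type_char = name_part.rpartition(":")
--                 if type_char == "t" and device_ts is None:
--                     try:
--                         device_ts = abs(int(raw_value)) & 0xFFFFFFFF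
--                     except (ValueError, TypeError):
--                         remaining.append(token)
--                     continue
--         remaining.append(token)
--     return device_ts, " ".join(remaining)
-- ===== SOURCE B (Python) =====
-- def _extract_timestamp_field(text: str):
--     """
--     Scan tokens in *text* for a  :t=<number>  field.
--     Index-based re-implementation: find the first qualifying token,
--     remove it by index, join the rest.
--     """
--     tokens = text.split()
--
--     def ts_value(token):
--         if "=" not in token:
--             return None
--         name, _, raw = token.partition("=")
--         if ":" not in name or name.rpartition(":")[2] != "t":
--             return None
--         try:
--             return abs(int(raw)) & 0xFFFFFFFF
--         except ValueError:
--             return None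
--
--     idx = next((i for i, tok in enumerate(tokens) if ts_value(tok) is not None), None)
--     if idx is None:
--         return None, " ".join(tokens)
--     return ts_value(tokens[idx]), " ".join(tokens[:idx] + tokens[idx + 1:])
-- ===== Notes on version B (the rewrite author's own statement) =====
-- stated objective: alternative
-- what changed: B replaces A's single stateful accumulate-and-flag loop by a find-first-index scan with a pure predicate/value helper, then removes that one index by slicing and joins; the not-found branch also joins (A normalizes whitespace there too).
import Mathlib
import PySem

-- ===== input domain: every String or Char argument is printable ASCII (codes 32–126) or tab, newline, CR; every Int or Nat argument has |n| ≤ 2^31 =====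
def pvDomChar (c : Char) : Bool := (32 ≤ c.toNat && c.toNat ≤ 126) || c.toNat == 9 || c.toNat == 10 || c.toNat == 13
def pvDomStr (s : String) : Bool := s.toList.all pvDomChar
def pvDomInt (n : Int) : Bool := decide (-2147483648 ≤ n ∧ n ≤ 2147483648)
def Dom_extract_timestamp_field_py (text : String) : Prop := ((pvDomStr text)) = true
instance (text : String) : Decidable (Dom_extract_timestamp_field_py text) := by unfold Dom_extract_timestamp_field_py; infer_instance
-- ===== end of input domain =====

-- B rewrites A's stateful accumulate-and-flag loop as a find-first-index scan with a pure
-- helper plus index removal and join; same cost, different decomposition (objective: alternative).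

-- ===== PORT A =====
-- A's stateful loop over the tokens: state = (device_ts, remaining); token.partition("=") is
-- ported by hand as takeWhile/dropWhile on the first '=', rpartition(":")[2] as the suffix
-- after the last ':' (exact for single-character separators).
def pvALoop : List (List Char) → Option Int → List (List Char) → Option Int × List (List Char)
  | [], ts, rem => (ts, rem)
  | tok :: rest, ts, rem =>
    if PySem.Chars.isIn ['='] tok then
      let name_part := tok.takeWhile (· ≠ '=')
      let raw_value := (tok.dropWhile (· ≠ '=')).drop 1
      if PySem.Chars.isIn [':'] name_part then
        let type_char := (name_part.reverse.takeWhile (· ≠ ':')).reverse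
        if type_char = ['t'] ∧ ts = none then
          match PySem.Int.ofChars? raw_value with
          | some v => pvALoop rest (some ((v.natAbs &&& 4294967295 : Nat) : Int)) rem
          | none => pvALoop rest ts (rem ++ [tok])
        else pvALoop rest ts (rem ++ [tok])
      else pvALoop rest ts (rem ++ [tok])
    else pvALoop rest ts (rem ++ [tok])

def extract_timestamp_field_py (text : String) : Option Int × String :=
  let r := pvALoop (PySem.Chars.split₀ text.toList) none []
  (r.1, String.ofList (PySem.Chars.join [' '] r.2))

-- ===== PORT B =====
-- ts_value: the pure predicate/value of one token (none = does not qualify).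
def pvTsValue (tok : List Char) : Option Int :=
  if PySem.Chars.isIn ['='] tok then
    let name := tok.takeWhile (· ≠ '=')
    let raw := (tok.dropWhile (· ≠ '=')).drop 1
    if PySem.Chars.isIn [':'] name ∧ (name.reverse.takeWhile (· ≠ ':')).reverse = ['t'] then
      (PySem.Int.ofChars? raw).map (fun v => ((v.natAbs &&& 4294967295 : Nat) : Int))
    else none
  else none

def extract_timestamp_field_py_alt (text : String) : Option Int × String :=
  let tokens := PySem.Chars.split₀ text.toList
  match tokens.findIdx? (fun t => (pvTsValue t).isSome) with
  | some i => (pvTsValue tokens[i]!,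
               String.ofList (PySem.Chars.join [' '] (tokens.take i ++ tokens.drop (i + 1))))
  | none => (none, String.ofList (PySem.Chars.join [' '] tokens))

-- ===== PRECONDITION & SPEC =====
def Spec_extract_timestamp_field_py (text : String) (out : Option Int × String) : Prop := out = extract_timestamp_field_py_alt text
instance (text : String) (out : Option Int × String) : Decidable (Spec_extract_timestamp_field_py text out) := by unfold Spec_extract_timestamp_field_py; infer_instance

-- ===== CLAIM (what is proved, stated in full; the proofs are below) =====
def Claim_equal_extract_timestamp_field_py : Prop := ∀ (text : String), Dom_extract_timestamp_field_py text → Spec_extract_timestamp_field_py text (extract_timestamp_field_py text)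

-- ===== LEMMAS AND PROOFS =====

-- Once the timestamp is set, A's loop only appends: every remaining token passes through.
theorem pvALoop_some (tokens : List (List Char)) (v : Int) (rem : List (List Char)) :
    pvALoop tokens (some v) rem = (some v, rem ++ tokens) := by
  induction tokens generalizing rem with
  | nil => simp [pvALoop]
  | cons tok rest ih =>
    simp only [pvALoop]
    split_ifs with h1 h2 h3
    · exact absurd h3.2 (by simp)
    all_goals simp [ih, List.append_assoc]

-- A's loop with ts = none, characterised by B's find-first-index scan.
theorem pvALoop_none (tokens : List (List Char)) (rem : List (List Char)) :
    pvALoop tokens none rem =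
      match tokens.findIdx? (fun t => (pvTsValue t).isSome) with
      | some i => (pvTsValue tokens[i]!, rem ++ (tokens.take i ++ tokens.drop (i + 1)))
      | none => (none, rem ++ tokens) := by
  induction tokens generalizing rem with
  | nil => simp [pvALoop]
  | cons tok rest ih =>
    by_cases hq : (pvTsValue tok).isSome = true
    · -- the head qualifies: findIdx? = some 0, A sets ts and drops the token
      have h1 : PySem.Chars.isIn ['='] tok = true := by
        by_contra h1
        have hn : pvTsValue tok = none := by simp only [pvTsValue]; rw [if_neg h1]
        rw [hn] at hq; simp at hq
      have h23 : PySem.Chars.isIn [':'] (tok.takeWhile (· ≠ '=')) = true ∧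
          ((tok.takeWhile (· ≠ '=')).reverse.takeWhile (· ≠ ':')).reverse = ['t'] := by
        by_contra h23
        have hn : pvTsValue tok = none := by
          simp only [pvTsValue]; rw [if_pos h1, if_neg h23]
        rw [hn] at hq; simp at hq
      obtain ⟨u, hpar⟩ : ∃ u, PySem.Int.ofChars? ((tok.dropWhile (· ≠ '=')).drop 1) = some u := by
        rcases hpar : PySem.Int.ofChars? ((tok.dropWhile (· ≠ '=')).drop 1) with _ | u
        · exfalso
          have hn : pvTsValue tok = none := by
            simp only [pvTsValue]; rw [if_pos h1, if_pos h23, hpar]; rfl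
          rw [hn] at hq; simp at hq
        · exact ⟨u, rfl⟩
      have hval : pvTsValue tok = some ((u.natAbs &&& 4294967295 : Nat) : Int) := by
        simp only [pvTsValue]; rw [if_pos h1, if_pos h23, hpar]; rfl
      have hfind : (tok :: rest).findIdx? (fun t => (pvTsValue t).isSome) = some 0 := by
        rw [List.findIdx?_cons]; simp [hq]
      rw [hfind]
      simp only [pvALoop]
      rw [if_pos h1, if_pos h23.1, if_pos ⟨h23.2, trivial⟩, hpar]
      simp [pvALoop_some, hval]
    · -- the head does not qualify: A appends it in every branch, index shifts by one
      have hq' : pvTsValue tok = none := Option.not_isSome_iff_eq_none.mp hq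
      have hstep : pvALoop (tok :: rest) none rem = pvALoop rest none (rem ++ [tok]) := by
        simp only [pvALoop]
        split_ifs with h1 h2 h3
        · rcases hpar : PySem.Int.ofChars? ((tok.dropWhile (· ≠ '=')).drop 1) with _ | u
          · rfl
          · exfalso; apply hq
            simp only [pvTsValue]; rw [if_pos h1, if_pos ⟨h2, h3.1⟩, hpar]; rfl
        · rfl
        · rfl
        · rfl
      have hfind : (tok :: rest).findIdx? (fun t => (pvTsValue t).isSome) =
          (rest.findIdx? (fun t => (pvTsValue t).isSome)).map (· + 1) := by
        rw [List.findIdx?_cons]; simp [hq']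
      rw [hstep, ih, hfind]
      rcases h : rest.findIdx? (fun t => (pvTsValue t).isSome) with _ | i <;>
        simp [List.append_assoc]

-- ===== VERDICT (by name: the statement is the Claim_ definition above) =====
theorem extract_timestamp_field_py_spec : Claim_equal_extract_timestamp_field_py := by
  intro text _
  unfold Spec_extract_timestamp_field_py
  rcases h : (PySem.Chars.split₀ text.toList).findIdx? (fun t => (pvTsValue t).isSome) with _ | i <;>
    simp [extract_timestamp_field_py, extract_timestamp_field_py_alt, pvALoop_none, h]
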